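-- pv_equiv track=rewrite | github.com/kgladstone/immaculate_grid_mlb_analysis | src/app/tabs/simulator_tab.py | _build_cube_counts
-- ===== SOURCE A (Python) =====
-- def _count_players_with_all(player_sets: list[set[str]], required_franchids: set[str]) -> int:
--     return sum(1 for s in player_sets if required_franchids.issubset(s))
--
-- def _build_cube_counts(
--     x_codes: list[str],
--     y_codes: list[str],
--     z_codes: list[str],
--     player_sets: list[set[str]],
-- ) -> list[list[list[int]]]:
--     cube = []
--     for z in z_codes:
--         layer = []
--         for x in x_codes:
--             row = []
--             for y in y_codes:
--                 row.append(_count_players_with_all(player_sets, {x, y, z}))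
--             layer.append(row)
--         cube.append(layer)
--     return cube
-- ===== SOURCE B (Python) =====
-- def _build_cube_counts(
--     x_codes: list[str],
--     y_codes: list[str],
--     z_codes: list[str],
--     player_sets: list[set[str]],
-- ) -> list[list[list[int]]]:
--     xs = list(dict.fromkeys(x_codes))
--     ys = list(dict.fromkeys(y_codes))
--     zs = list(dict.fromkeys(z_codes))
--     counts = {}
--     for s in player_sets:
--         for x in xs:
--             if x in s:
--                 for y in ys:
--                     if y in s:
--                         for z in zs:
--                             if z in s:
--                                 k = (x, y, z)
--                                 counts[k] = counts.get(k, 0) + 1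
--     return [
--         [[counts.get((x, y, z), 0) for y in y_codes] for x in x_codes]
--         for z in z_codes
--     ]
-- ===== Notes on version B (the rewrite author's own statement) =====
-- stated objective: faster
-- what changed: Instead of scanning all players for every (x,y,z) cell, B makes one pass over the players, incrementing a hash-map counter only at the code triples each player actually covers, then reads the cube off the counter.
import Mathlib
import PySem

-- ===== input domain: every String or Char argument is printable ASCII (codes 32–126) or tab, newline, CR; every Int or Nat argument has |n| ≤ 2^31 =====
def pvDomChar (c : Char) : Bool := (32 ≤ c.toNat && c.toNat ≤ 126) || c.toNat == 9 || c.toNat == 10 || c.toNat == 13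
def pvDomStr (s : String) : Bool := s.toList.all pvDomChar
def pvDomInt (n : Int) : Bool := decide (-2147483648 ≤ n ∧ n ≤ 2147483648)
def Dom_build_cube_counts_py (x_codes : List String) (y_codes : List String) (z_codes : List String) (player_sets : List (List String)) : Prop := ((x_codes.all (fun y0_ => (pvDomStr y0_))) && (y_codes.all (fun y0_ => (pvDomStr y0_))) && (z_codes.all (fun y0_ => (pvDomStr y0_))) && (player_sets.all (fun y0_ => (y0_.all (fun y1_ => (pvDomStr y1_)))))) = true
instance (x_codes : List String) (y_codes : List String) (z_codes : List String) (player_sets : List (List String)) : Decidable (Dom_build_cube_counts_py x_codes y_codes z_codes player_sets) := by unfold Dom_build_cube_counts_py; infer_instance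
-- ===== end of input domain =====

-- B replaces A's per-cell scan of all players by one pass over the players that increments a
-- counter keyed by the code triples each player covers; objective: faster (asymptotic).

-- ===== PORT A =====
-- sum(1 for s in player_sets if required_franchids.issubset(s))
def pv_count_players_with_all (player_sets : List (List String)) (required_franchids : List String) : Int :=
  player_sets.foldl (fun acc s => if PySem.Set.issubset required_franchids s then acc + 1 else acc) 0

def build_cube_counts_py (x_codes : List String) (y_codes : List String) (z_codes : List String) (player_sets : List (List String)) : List (List (List Int)) :=
  z_codes.foldl (fun cube z =>
    cube ++ [x_codes.foldl (fun layer x =>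
      layer ++ [y_codes.foldl (fun row y =>
        row ++ [pv_count_players_with_all player_sets (PySem.Set.ofList [x, y, z])]) []]) []]) []

-- ===== PORT B =====
-- innermost loop: 'for z in zs: if z in s: counts[(x,y,z)] = counts.get((x,y,z),0)+1'
def pvBumpZ (s : List String) (x y : String) (zs : List String)
    (d : PySem.Dict (String × String × String) Int) : PySem.Dict (String × String × String) Int :=
  zs.foldl (fun d z => if s.contains z then d.insert (x, y, z) (d.getD (x, y, z) 0 + 1) else d) d

def pvBumpY (s : List String) (x : String) (ys zs : List String)
    (d : PySem.Dict (String × String × String) Int) : PySem.Dict (String × String × String) Int :=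
  ys.foldl (fun d y => if s.contains y then pvBumpZ s x y zs d else d) d

def pvBumpX (s : List String) (xs ys zs : List String)
    (d : PySem.Dict (String × String × String) Int) : PySem.Dict (String × String × String) Int :=
  xs.foldl (fun d x => if s.contains x then pvBumpY s x ys zs d else d) d

def build_cube_counts_py_alt (x_codes : List String) (y_codes : List String) (z_codes : List String) (player_sets : List (List String)) : List (List (List Int)) :=
  let xs := PySem.List.dedup x_codes
  let ys := PySem.List.dedup y_codes
  let zs := PySem.List.dedup z_codes
  let counts := player_sets.foldl (fun d s => pvBumpX s xs ys zs d) PySem.Dict.empty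
  z_codes.map (fun z => x_codes.map (fun x => y_codes.map (fun y => counts.getD (x, y, z) 0)))

-- ===== PRECONDITION & SPEC =====
def Spec_build_cube_counts_py (x_codes : List String) (y_codes : List String) (z_codes : List String) (player_sets : List (List String)) (out : List (List (List Int))) : Prop := out = build_cube_counts_py_alt x_codes y_codes z_codes player_sets
instance (x_codes : List String) (y_codes : List String) (z_codes : List String) (player_sets : List (List String)) (out : List (List (List Int))) : Decidable (Spec_build_cube_counts_py x_codes y_codes z_codes player_sets out) := by unfold Spec_build_cube_counts_py; infer_instance

-- ===== CLAIM (what is proved, stated in full; the proofs are below) =====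
def Claim_equal_build_cube_counts_py : Prop := ∀ (x_codes : List String) (y_codes : List String) (z_codes : List String) (player_sets : List (List String)), Dom_build_cube_counts_py x_codes y_codes z_codes player_sets → Spec_build_cube_counts_py x_codes y_codes z_codes player_sets (build_cube_counts_py x_codes y_codes z_codes player_sets)

-- ===== LEMMAS AND PROOFS =====

-- {x, y, z}.issubset(s) tests exactly membership of the three codes
lemma pv_sub3 (x y z : String) (s : List String) :
    PySem.Set.issubset (PySem.Set.ofList [x, y, z]) s = (s.contains x && s.contains y && s.contains z) := by
  rw [Bool.eq_iff_iff]
  simp only [PySem.Set.issubset_iff, PySem.Set.mem_ofList, Bool.and_eq_true, List.contains_iff_mem,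
    List.mem_cons, List.not_mem_nil, or_false]
  constructor
  · intro h; exact ⟨⟨h x (Or.inl rfl), h y (Or.inr (Or.inl rfl))⟩, h z (Or.inr (Or.inr rfl))⟩
  · rintro ⟨⟨hx, hy⟩, hz⟩ c hc
    rcases hc with rfl | rfl | rfl <;> assumption

lemma pvBumpZ_cons (s : List String) (x y a : String) (t : List String) (d : PySem.Dict (String × String × String) Int) :
    pvBumpZ s x y (a :: t) d
      = pvBumpZ s x y t (if s.contains a then d.insert (x, y, a) (d.getD (x, y, a) 0 + 1) else d) := by
  simp only [pvBumpZ, List.foldl_cons]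

lemma pvBumpY_cons (s : List String) (x a : String) (t zs : List String) (d : PySem.Dict (String × String × String) Int) :
    pvBumpY s x (a :: t) zs d = pvBumpY s x t zs (if s.contains a then pvBumpZ s x a zs d else d) := by
  simp only [pvBumpY, List.foldl_cons]

lemma pvBumpX_cons (s : List String) (a : String) (t ys zs : List String) (d : PySem.Dict (String × String × String) Int) :
    pvBumpX s (a :: t) ys zs d = pvBumpX s t ys zs (if s.contains a then pvBumpY s a ys zs d else d) := by
  simp only [pvBumpX, List.foldl_cons]

lemma pvBumpZ_ne (s : List String) (x' y' x y z : String) (zs : List String) (d : PySem.Dict (String × String × String) Int)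
    (hne : x' ≠ x ∨ y' ≠ y) :
    (pvBumpZ s x' y' zs d).getD (x, y, z) 0 = d.getD (x, y, z) 0 := by
  induction zs generalizing d with
  | nil => rfl
  | cons a t ih =>
    rw [pvBumpZ_cons, ih]
    split
    · rw [PySem.Dict.getD_insert_of_ne]
      intro he
      injection he with h1 h2; injection h2 with h2 _
      rcases hne with h | h
      · exact h h1.symm
      · exact h h2.symm
    · rfl

lemma pvBumpZ_skip (s : List String) (x y z : String) (zs : List String) (d : PySem.Dict (String × String × String) Int)
    (hz : z ∉ zs) :
    (pvBumpZ s x y zs d).getD (x, y, z) 0 = d.getD (x, y, z) 0 := by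
  induction zs generalizing d with
  | nil => rfl
  | cons a t ih =>
    have haz : z ≠ a := fun h => hz (h ▸ List.mem_cons_self)
    have ht : z ∉ t := fun h => hz (List.mem_cons_of_mem _ h)
    rw [pvBumpZ_cons, ih _ ht]
    split
    · rw [PySem.Dict.getD_insert_of_ne]; simp [haz]
    · rfl

lemma pvBumpZ_hit (s : List String) (x y z : String) (zs : List String) (d : PySem.Dict (String × String × String) Int)
    (hnd : zs.Nodup) (hz : z ∈ zs) :
    (pvBumpZ s x y zs d).getD (x, y, z) 0 = d.getD (x, y, z) 0 + (if s.contains z then 1 else 0) := by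
  induction zs generalizing d with
  | nil => cases hz
  | cons a t ih =>
    rw [pvBumpZ_cons]
    rcases List.mem_cons.mp hz with rfl | hzt
    · have hnt : z ∉ t := (List.nodup_cons.mp hnd).1
      by_cases hc : s.contains z
      · rw [if_pos hc, pvBumpZ_skip s x y z t _ hnt, PySem.Dict.getD_insert_self, if_pos hc]
      · rw [if_neg hc, pvBumpZ_skip s x y z t _ hnt, if_neg hc, add_zero]
    · have haz : z ≠ a := fun h => (List.nodup_cons.mp hnd).1 (h ▸ hzt)
      have hnt := (List.nodup_cons.mp hnd).2
      rw [ih _ hnt hzt]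
      split
      · rw [PySem.Dict.getD_insert_of_ne]; simp [haz]
      · rfl

lemma pvBumpY_ne (s : List String) (x' x y z : String) (ys zs : List String) (d : PySem.Dict (String × String × String) Int)
    (hne : x' ≠ x) :
    (pvBumpY s x' ys zs d).getD (x, y, z) 0 = d.getD (x, y, z) 0 := by
  induction ys generalizing d with
  | nil => rfl
  | cons a t ih =>
    rw [pvBumpY_cons, ih]
    split
    · exact pvBumpZ_ne _ _ _ _ _ _ _ _ (Or.inl hne)
    · rfl

lemma pvBumpY_skip (s : List String) (x y z : String) (ys zs : List String) (d : PySem.Dict (String × String × String) Int)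
    (hy : y ∉ ys) :
    (pvBumpY s x ys zs d).getD (x, y, z) 0 = d.getD (x, y, z) 0 := by
  induction ys generalizing d with
  | nil => rfl
  | cons a t ih =>
    have hay : a ≠ y := fun h => hy (h ▸ List.mem_cons_self)
    have ht : y ∉ t := fun h => hy (List.mem_cons_of_mem _ h)
    rw [pvBumpY_cons, ih _ ht]
    split
    · exact pvBumpZ_ne _ _ _ _ _ _ _ _ (Or.inr hay)
    · rfl

lemma pvBumpY_hit (s : List String) (x y z : String) (ys zs : List String) (d : PySem.Dict (String × String × String) Int)
    (hndy : ys.Nodup) (hy : y ∈ ys) (hndz : zs.Nodup) (hz : z ∈ zs) :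
    (pvBumpY s x ys zs d).getD (x, y, z) 0
      = d.getD (x, y, z) 0 + (if s.contains y && s.contains z then 1 else 0) := by
  induction ys generalizing d with
  | nil => cases hy
  | cons a t ih =>
    rw [pvBumpY_cons]
    rcases List.mem_cons.mp hy with rfl | hyt
    · have hnt : y ∉ t := (List.nodup_cons.mp hndy).1
      by_cases hc : s.contains y
      · rw [if_pos hc, pvBumpY_skip s x y z t zs _ hnt, pvBumpZ_hit s x y z zs d hndz hz, hc,
          Bool.true_and]
      · rw [if_neg hc, pvBumpY_skip s x y z t zs _ hnt]
        rw [Bool.not_eq_true] at hc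
        rw [hc, Bool.false_and]
        simp
    · have hay : y ≠ a := fun h => (List.nodup_cons.mp hndy).1 (h ▸ hyt)
      have hnt := (List.nodup_cons.mp hndy).2
      rw [ih _ hnt hyt]
      split
      · rw [pvBumpZ_ne _ _ _ _ _ _ _ _ (Or.inr (Ne.symm hay))]
      · rfl

lemma pvBumpX_skip (s : List String) (x y z : String) (xs ys zs : List String) (d : PySem.Dict (String × String × String) Int)
    (hx : x ∉ xs) :
    (pvBumpX s xs ys zs d).getD (x, y, z) 0 = d.getD (x, y, z) 0 := by
  induction xs generalizing d with
  | nil => rfl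
  | cons a t ih =>
    have hax : a ≠ x := fun h => hx (h ▸ List.mem_cons_self)
    have ht : x ∉ t := fun h => hx (List.mem_cons_of_mem _ h)
    rw [pvBumpX_cons, ih _ ht]
    split
    · exact pvBumpY_ne _ _ _ _ _ _ _ _ hax
    · rfl

lemma pvBumpX_hit (s : List String) (x y z : String) (xs ys zs : List String) (d : PySem.Dict (String × String × String) Int)
    (hndx : xs.Nodup) (hx : x ∈ xs) (hndy : ys.Nodup) (hy : y ∈ ys) (hndz : zs.Nodup) (hz : z ∈ zs) :
    (pvBumpX s xs ys zs d).getD (x, y, z) 0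
      = d.getD (x, y, z) 0 + (if s.contains x && s.contains y && s.contains z then 1 else 0) := by
  induction xs generalizing d with
  | nil => cases hx
  | cons a t ih =>
    rw [pvBumpX_cons]
    rcases List.mem_cons.mp hx with rfl | hxt
    · have hnt : x ∉ t := (List.nodup_cons.mp hndx).1
      by_cases hc : s.contains x
      · rw [if_pos hc, pvBumpX_skip s x y z t ys zs _ hnt, pvBumpY_hit s x y z ys zs d hndy hy hndz hz,
          hc, Bool.true_and]
      · rw [if_neg hc, pvBumpX_skip s x y z t ys zs _ hnt]
        rw [Bool.not_eq_true] at hc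
        rw [hc, Bool.false_and]
        simp
    · have hax : x ≠ a := fun h => (List.nodup_cons.mp hndx).1 (h ▸ hxt)
      have hnt := (List.nodup_cons.mp hndx).2
      rw [ih _ hnt hxt]
      split
      · rw [pvBumpY_ne _ _ _ _ _ _ _ _ (Ne.symm hax)]
      · rfl

lemma pv_counts_getD (player_sets : List (List String)) (x y z : String) (xs ys zs : List String)
    (d : PySem.Dict (String × String × String) Int)
    (hndx : xs.Nodup) (hx : x ∈ xs) (hndy : ys.Nodup) (hy : y ∈ ys) (hndz : zs.Nodup) (hz : z ∈ zs) :
    (player_sets.foldl (fun d s => pvBumpX s xs ys zs d) d).getD (x, y, z) 0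
      = d.getD (x, y, z) 0
        + (player_sets.countP (fun s => s.contains x && s.contains y && s.contains z) : Int) := by
  induction player_sets generalizing d with
  | nil => simp
  | cons s t ih =>
    rw [List.foldl_cons, ih _, pvBumpX_hit s x y z xs ys zs d hndx hx hndy hy hndz hz,
      List.countP_cons]
    split <;> push_cast <;> ring

lemma pv_countA (player_sets : List (List String)) (x y z : String) :
    pv_count_players_with_all player_sets (PySem.Set.ofList [x, y, z])
      = (player_sets.countP (fun s => s.contains x && s.contains y && s.contains z) : Int) := by
  unfold pv_count_players_with_all
  rw [PySem.List.foldl_if_add_one]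
  simp only [zero_add]
  congr 1
  exact List.countP_congr (fun s _ => by rw [pv_sub3])

-- ===== VERDICT (by name: the statement is the Claim_ definition above) =====
theorem build_cube_counts_py_spec : Claim_equal_build_cube_counts_py := by
  intro x_codes y_codes z_codes player_sets _
  unfold Spec_build_cube_counts_py build_cube_counts_py build_cube_counts_py_alt
  simp only [PySem.List.foldl_append_singleton_eq_map, List.nil_append]
  apply List.map_congr_left; intro z hz
  apply List.map_congr_left; intro x hx
  apply List.map_congr_left; intro y hy
  rw [pv_countA,
    pv_counts_getD player_sets x y z (PySem.List.dedup x_codes) (PySem.List.dedup y_codes)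
      (PySem.List.dedup z_codes) PySem.Dict.empty (PySem.List.nodup_dedup _)
      ((PySem.List.mem_dedup _ _).mpr hx) (PySem.List.nodup_dedup _)
      ((PySem.List.mem_dedup _ _).mpr hy) (PySem.List.nodup_dedup _)
      ((PySem.List.mem_dedup _ _).mpr hz)]
  simp [PySem.Dict.getD, PySem.Dict.get?, PySem.Dict.empty]
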